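-- pv_equiv track=rewrite | github.com/asfag4191/Python | Koder/Laber/lab6/fantasy_game_inventory.py | display_inventory
-- ===== SOURCE A (Python) =====
-- def display_inventory(d):
--     count = 0
--     output = "Inventory:\n"  # Lager en streng som skal returneres
--     for item, amount in d.items():
--         count += amount
--         output += f"{amount} {item}\n"  # Legger til hver linje i output-strengen
--     output += f"\nTotal number of items: {count}"  # Legger til totalsum
--     return output  # Returnerer hele output-strengen
-- ===== SOURCE B (Python) =====
-- def display_inventory(d):
--     items = list(d.items())
--     def go(lo, hi):
--         # (body, total) for items[lo:hi], by balanced divide and conquer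
--         if hi - lo == 0:
--             return ('', 0)
--         if hi - lo == 1:
--             item, amount = items[lo]
--             return (f'{amount} {item}\n', amount)
--         mid = (lo + hi) // 2
--         b1, t1 = go(lo, mid)
--         b2, t2 = go(mid, hi)
--         return (b1 + b2, t1 + t2)
--     body, total = go(0, len(items))
--     return 'Inventory:\n' + body + f'\nTotal number of items: {total}'
-- ===== Notes on version B (the rewrite author's own statement) =====
-- stated objective: alternative
-- what changed: Replaced A's single left-to-right loop mutating two accumulators (count and a growing output string) by a balanced divide-and-conquer recursion over index ranges that returns (body, total) pairs for each half and concatenates/adds them.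
import Mathlib
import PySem

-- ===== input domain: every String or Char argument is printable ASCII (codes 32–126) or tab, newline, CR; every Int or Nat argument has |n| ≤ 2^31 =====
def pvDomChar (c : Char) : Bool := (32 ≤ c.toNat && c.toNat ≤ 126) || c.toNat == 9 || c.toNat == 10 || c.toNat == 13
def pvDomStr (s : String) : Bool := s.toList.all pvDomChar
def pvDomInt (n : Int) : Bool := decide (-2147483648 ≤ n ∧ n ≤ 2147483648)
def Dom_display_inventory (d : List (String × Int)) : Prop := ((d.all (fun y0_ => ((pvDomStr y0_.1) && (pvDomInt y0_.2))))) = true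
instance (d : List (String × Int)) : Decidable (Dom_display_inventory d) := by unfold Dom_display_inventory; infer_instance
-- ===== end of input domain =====

-- B: balanced divide-and-conquer recursion returning (body, total) pairs per half, instead of A's loop mutating two accumulators; return value only.
-- ===== PORT A =====
def display_inventory (d : List (String × Int)) : String :=
  let st := d.foldl (fun (s : Int × String) p =>
    (s.1 + p.2, s.2 ++ PySem.Int.toStr p.2 ++ " " ++ p.1 ++ "\n")) (0, "Inventory:\n")
  st.2 ++ "\nTotal number of items: " ++ PySem.Int.toStr st.1

-- ===== PORT B =====
-- Python's go(lo, hi) works on items[lo:hi]; here the slice is passed directly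
-- (mid - lo = (hi - lo) // 2, so the split point is length / 2 of the slice).
def diGo : List (String × Int) → String × Int
  | [] => ("", 0)
  | [(item, amount)] => (PySem.Int.toStr amount ++ " " ++ item ++ "\n", amount)
  | a :: b :: rest =>
    let l := a :: b :: rest
    let mid := l.length / 2
    let r1 := diGo (l.take mid)
    let r2 := diGo (l.drop mid)
    (r1.1 ++ r2.1, r1.2 + r2.2)
termination_by l => l.length
decreasing_by
  · simp only [List.length_take, List.length_cons]; omega
  · simp only [List.length_drop, List.length_cons]; omega

def display_inventory_alt (d : List (String × Int)) : String :=
  let r := diGo d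
  "Inventory:\n" ++ r.1 ++ "\nTotal number of items: " ++ PySem.Int.toStr r.2

-- ===== PRECONDITION & SPEC =====
def Spec_display_inventory (d : List (String × Int)) (out : String) : Prop := out = display_inventory_alt d
instance (d : List (String × Int)) (out : String) : Decidable (Spec_display_inventory d out) := by unfold Spec_display_inventory; infer_instance

-- ===== CLAIM (what is proved, stated in full; the proofs are below) =====
def Claim_equal_display_inventory : Prop := ∀ (d : List (String × Int)), Dom_display_inventory d → Spec_display_inventory d (display_inventory d)

-- ===== LEMMAS AND PROOFS =====
def diLine (p : String × Int) : String := PySem.Int.toStr p.2 ++ " " ++ p.1 ++ "\n"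

lemma str_foldl_append (l : List String) (x y : String) :
    l.foldl (fun r s => r ++ s) (x ++ y) = x ++ l.foldl (fun r s => r ++ s) y := by
  induction l generalizing y with
  | nil => simp
  | cons h t ih => simp only [List.foldl_cons, String.append_assoc, ih]

lemma str_foldl_eq (l : List String) (x : String) :
    l.foldl (fun r s => r ++ s) x = x ++ l.foldl (fun r s => r ++ s) "" := by
  conv_lhs => rw [show x = x ++ "" by simp]
  rw [str_foldl_append]

lemma str_join_append (a b : List String) :
    String.join (a ++ b) = String.join a ++ String.join b := by
  simp only [String.join, List.foldl_append]
  rw [str_foldl_eq]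

lemma diGo_eq (l : List (String × Int)) :
    diGo l = (String.join (l.map diLine), (l.map Prod.snd).sum) := by
  induction l using diGo.induct with
  | case1 => simp [diGo, String.join]
  | case2 item amount => simp [diGo, diLine, String.join]
  | case3 a b rest l mid ih1 ih2 =>
    rw [diGo, ih1, ih2]
    rw [show (a :: b :: rest).map diLine
          = ((a :: b :: rest).take ((a :: b :: rest).length / 2)).map diLine
            ++ ((a :: b :: rest).drop ((a :: b :: rest).length / 2)).map diLine by
        rw [← List.map_append, List.take_append_drop],
      str_join_append]
    rw [show (a :: b :: rest).map Prod.snd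
          = ((a :: b :: rest).take ((a :: b :: rest).length / 2)).map Prod.snd
            ++ ((a :: b :: rest).drop ((a :: b :: rest).length / 2)).map Prod.snd by
        rw [← List.map_append, List.take_append_drop],
      List.sum_append]

lemma display_inventory_foldl (d : List (String × Int)) (c : Int) (out : String) :
    d.foldl (fun (s : Int × String) p =>
      (s.1 + p.2, s.2 ++ PySem.Int.toStr p.2 ++ " " ++ p.1 ++ "\n")) (c, out)
    = (c + (d.map Prod.snd).sum, out ++ String.join (d.map diLine)) := by
  induction d generalizing c out with
  | nil => simp [String.join]
  | cons h t ih =>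
    simp only [List.foldl_cons, ih, List.map_cons, List.sum_cons, String.join, List.foldl_cons,
      Prod.mk.injEq]
    constructor
    · ring
    · rw [show ("" ++ diLine h) = (diLine h ++ "") by simp, str_foldl_append]
      simp [diLine, String.join, String.append_assoc]

-- ===== VERDICT (by name: the statement is the Claim_ definition above) =====
theorem display_inventory_spec : Claim_equal_display_inventory := by
  intro d _
  unfold Spec_display_inventory display_inventory display_inventory_alt
  rw [display_inventory_foldl, diGo_eq]
  simp [String.append_assoc]
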